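-- pv_equiv track=rewrite | github.com/Lori-ml/Data-Ingestion | data_processing.py | process_sql_query
-- ===== SOURCE A (Python) =====
-- def quote_identifier(identifier):
--     """Quotes SQL identifiers such as table and column names if they are not already quoted.
--
--        Input: identifier: SQL identifier to be quoted.
--
--        Output: Quoted SQL identifier
--
--     """
--
--     if not (identifier.startswith('"') and identifier.endswith('"')):
--         identifier = identifier.replace('"', '')
--         identifier = f'"{identifier}"'
--     return identifier
--
-- def process_sql_query(sql_query):
--
--     """Processes a SQL query, quoting identifiers after keywords like "FROM" and "JOIN" to ensure proper formatting.
--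
--        Input: sql_query: Input SQL query.
--
--        Output: Processed SQL query. """
--
--     sql_parts = sql_query.split()
--     processed_parts = []
--     previous_word = ""
--     for word in sql_parts:
--         if previous_word.upper() in ["FROM", "JOIN"]:
--             word = quote_identifier(word)
--         processed_parts.append(word)
--         previous_word = word
--     return ' '.join(processed_parts)
-- ===== SOURCE B (Python) =====
-- def quote_identifier(identifier):
--     """Quotes a SQL identifier unless it is already double-quoted."""
--     if not (identifier.startswith('"') and identifier.endswith('"')):
--         identifier = identifier.replace('"', '')
--         identifier = f'"{identifier}"'
--     return identifier
--
-- def is_keyword(word):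
--     return word.upper() in ("FROM", "JOIN")
--
-- def process_sql_query(sql_query):
--     """Quote identifiers after FROM/JOIN; consumes keyword+identifier pairs in one left-to-right pass."""
--     tokens = sql_query.split()
--     out = []
--     i = 0
--     n = len(tokens)
--     while i < n:
--         t = tokens[i]
--         out.append(t)
--         if is_keyword(t) and i + 1 < n:
--             out.append(quote_identifier(tokens[i + 1]))
--             i += 2
--         else:
--             i += 1
--     return ' '.join(out)
-- ===== Notes on version B (the rewrite author's own statement) =====
-- stated objective: alternative
-- what changed: Replaces A's fold that threads the previous (already-processed) word through every step with a one-pass scan that consumes keyword+identifier PAIRS at once (quoting the token right after FROM/JOIN and skipping two), relying on the fact that a quoted token can never itself be a keyword.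
import Mathlib
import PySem

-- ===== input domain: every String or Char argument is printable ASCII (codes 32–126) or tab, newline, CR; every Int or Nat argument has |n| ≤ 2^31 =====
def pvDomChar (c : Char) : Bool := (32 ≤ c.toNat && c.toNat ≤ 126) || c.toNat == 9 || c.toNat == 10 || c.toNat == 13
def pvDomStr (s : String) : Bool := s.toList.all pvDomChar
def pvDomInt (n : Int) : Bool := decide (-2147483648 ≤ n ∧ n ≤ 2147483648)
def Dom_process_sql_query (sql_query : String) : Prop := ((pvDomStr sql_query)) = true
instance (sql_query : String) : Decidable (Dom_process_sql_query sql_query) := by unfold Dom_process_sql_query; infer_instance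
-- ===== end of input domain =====

-- B changes the traversal (pairwise keyword+identifier scan instead of threading the previous processed word); same return value, no speed claim.

-- ===== PORT A =====
-- quote_identifier from Source A (on List Char; strings enter/leave via toList/mk)
def pvQuoteIdentifier (identifier : List Char) : List Char :=
  if PySem.Chars.startswith identifier ['"'] && PySem.Chars.endswith identifier ['"'] then
    identifier
  else
    '"' :: PySem.Chars.replace identifier ['"'] [] ++ ['"']

-- the for-loop of A: state = (processed_parts, previous_word)
def pvALoop : List (List Char) → List (List Char) → List Char → List (List Char)
  | [], processed, _ => processed
  | w :: rest, processed, previous =>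
    let w' := if PySem.Chars.upper previous = "FROM".toList ∨ PySem.Chars.upper previous = "JOIN".toList
              then pvQuoteIdentifier w else w
    pvALoop rest (processed ++ [w']) w'

def process_sql_query (sql_query : String) : String :=
  String.mk (PySem.Chars.join [' '] (pvALoop (PySem.Chars.split₀ sql_query.toList) [] []))

-- ===== PORT B =====
-- quote_identifier from Source B
def pvQuoteIdentifierAlt (identifier : List Char) : List Char :=
  if PySem.Chars.startswith identifier ['"'] && PySem.Chars.endswith identifier ['"'] then
    identifier
  else
    '"' :: PySem.Chars.replace identifier ['"'] [] ++ ['"']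

-- is_keyword from Source B
def pvIsKeyword (word : List Char) : Bool :=
  decide (PySem.Chars.upper word = "FROM".toList ∨ PySem.Chars.upper word = "JOIN".toList)

-- the while-loop of Source B: consume a keyword+identifier pair, or a single token
def pvBScan : List (List Char) → List (List Char)
  | [] => []
  | t :: rest =>
    if pvIsKeyword t then
      match rest with
      | [] => [t]
      | w :: rs => t :: pvQuoteIdentifierAlt w :: pvBScan rs
    else t :: pvBScan rest

def process_sql_query_alt (sql_query : String) : String :=
  String.mk (PySem.Chars.join [' '] (pvBScan (PySem.Chars.split₀ sql_query.toList)))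

-- ===== PRECONDITION & SPEC =====
def Spec_process_sql_query (sql_query : String) (out : String) : Prop := out = process_sql_query_alt sql_query
instance (sql_query : String) (out : String) : Decidable (Spec_process_sql_query sql_query out) := by unfold Spec_process_sql_query; infer_instance

-- ===== CLAIM (what is proved, stated in full; the proofs are below) =====
def Claim_equal_process_sql_query : Prop := ∀ (sql_query : String), Dom_process_sql_query sql_query → Spec_process_sql_query sql_query (process_sql_query sql_query)

-- ===== LEMMAS AND PROOFS =====

-- A's accumulator peels off
theorem pvALoop_acc (ts : List (List Char)) :
    ∀ (acc : List (List Char)) (p : List Char), pvALoop ts acc p = acc ++ pvALoop ts [] p := by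
  induction ts with
  | nil => intro acc p; simp [pvALoop]
  | cons w rest ih =>
    intro acc p
    simp only [pvALoop]
    conv_lhs => rw [ih]
    conv_rhs => rw [ih]
    simp

-- a quoted identifier always starts with '"'
theorem pvQuote_head (w : List Char) : ∃ t, pvQuoteIdentifier w = '"' :: t := by
  unfold pvQuoteIdentifier
  split
  · next h =>
    have h1 : PySem.Chars.startswith w ['"'] = true := by
      cases hs : PySem.Chars.startswith w ['"'] <;> simp [hs] at h ⊢
    rcases (PySem.Chars.startswith_iff _ _).mp h1 with ⟨t, ht⟩
    exact ⟨t, ht.symm⟩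
  · exact ⟨_, rfl⟩

-- hence it is never FROM/JOIN (its upper-case still starts with '"')
theorem pvQuote_not_kw (w : List Char) : pvIsKeyword (pvQuoteIdentifier w) = false := by
  rcases pvQuote_head w with ⟨t, ht⟩
  have hu : PySem.Chars.upper ('"' :: t) = '"' :: PySem.Chars.upper t := by
    simp [PySem.Chars.upper]; decide
  simp only [pvIsKeyword, ht, hu, decide_eq_false_iff_not]
  rintro (h | h) <;> exact absurd (List.head_eq_of_cons_eq h) (by decide)

-- the two quote helpers are the same function
theorem pvQuote_eq (w : List Char) : pvQuoteIdentifierAlt w = pvQuoteIdentifier w := rfl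

-- main loop equivalence: for any non-keyword previous word, A's loop = B's scan
theorem pvLoop_eq_scan (ts : List (List Char)) :
    ∀ p : List Char, pvIsKeyword p = false → pvALoop ts [] p = pvBScan ts := by
  induction ts using pvBScan.induct with
  | case1 => intro p _; simp [pvALoop, pvBScan]
  | case2 t hkw =>
    intro p hp
    have hpne : ¬ (PySem.Chars.upper p = "FROM".toList ∨ PySem.Chars.upper p = "JOIN".toList) := by
      simpa [pvIsKeyword] using hp
    simp only [pvALoop, pvBScan, hkw]
    rw [if_neg hpne]
    simp
  | case3 t hkw w rs ih =>
    intro p hp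
    have hpne : ¬ (PySem.Chars.upper p = "FROM".toList ∨ PySem.Chars.upper p = "JOIN".toList) := by
      simpa [pvIsKeyword] using hp
    have htkw : (PySem.Chars.upper t = "FROM".toList ∨ PySem.Chars.upper t = "JOIN".toList) := by
      simpa [pvIsKeyword] using hkw
    simp only [pvALoop, pvBScan, hkw]
    rw [if_neg hpne, if_pos htkw, pvALoop_acc, pvALoop_acc, ih _ (pvQuote_not_kw w), pvQuote_eq]
    simp
  | case4 t rest hkw ih =>
    intro p hp
    have hkf : pvIsKeyword t = false := by simpa using hkw
    have hpne : ¬ (PySem.Chars.upper p = "FROM".toList ∨ PySem.Chars.upper p = "JOIN".toList) := by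
      simpa [pvIsKeyword] using hp
    simp only [pvALoop]
    rw [if_neg hpne, pvALoop_acc, ih _ hkf]
    conv_rhs => rw [pvBScan.eq_def]
    simp [hkf]

-- ===== VERDICT (by name: the statement is the Claim_ definition above) =====
theorem process_sql_query_spec : Claim_equal_process_sql_query := by
  intro s _
  unfold Spec_process_sql_query process_sql_query process_sql_query_alt
  rw [pvLoop_eq_scan _ [] (by decide)]
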